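-- pv_equiv track=rewrite | github.com/mindaula/ContextualAI | app/retrieval/ingestion/ingest_books.py | semantic_chunk_code
-- ===== SOURCE A (Python) =====
-- def semantic_chunk_code(text, max_lines=80):
--     """Chunk code text into fixed-size line windows.
--
--     Args:
--         text: Cleaned source-code text.
--         max_lines: Maximum line count per chunk.
--
--     Returns:
--         List of non-empty code chunks.
--
--     Determinism and performance:
--         Deterministic fixed-step slicing with linear runtime in line count.
--     """
--     lines = text.split("\n")
--     chunks = []
--
--     for i in range(0, len(lines), max_lines):
--         chunk = "\n".join(lines[i:i + max_lines])
--         if chunk.strip():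
--             chunks.append(chunk)
--
--     return chunks
-- ===== SOURCE B (Python) =====
-- def _flush(chunks, buf):
--     chunk = "\n".join(buf)
--     if chunk.strip():
--         chunks.append(chunk)
--
--
-- def semantic_chunk_code(text, max_lines=80):
--     """Chunk code text into fixed-size line windows (single incremental pass)."""
--     chunks = []
--     buf = []
--     for line in text.split("\n"):
--         buf.append(line)
--         if len(buf) >= max_lines:
--             _flush(chunks, buf)
--             buf = []
--     if buf:
--         _flush(chunks, buf)
--     return chunks
-- ===== Notes on version B (the rewrite author's own statement) =====
-- stated objective: alternative
-- what changed: Replaces index-stride slicing over range(0, len(lines), max_lines) with a single incremental pass that accumulates lines into a buffer and flushes it each time it reaches max_lines (plus a final flush).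
-- outside the precondition, e.g. on semantic_chunk_code('a', -1): A returns [], B returns ['a']
import Mathlib
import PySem

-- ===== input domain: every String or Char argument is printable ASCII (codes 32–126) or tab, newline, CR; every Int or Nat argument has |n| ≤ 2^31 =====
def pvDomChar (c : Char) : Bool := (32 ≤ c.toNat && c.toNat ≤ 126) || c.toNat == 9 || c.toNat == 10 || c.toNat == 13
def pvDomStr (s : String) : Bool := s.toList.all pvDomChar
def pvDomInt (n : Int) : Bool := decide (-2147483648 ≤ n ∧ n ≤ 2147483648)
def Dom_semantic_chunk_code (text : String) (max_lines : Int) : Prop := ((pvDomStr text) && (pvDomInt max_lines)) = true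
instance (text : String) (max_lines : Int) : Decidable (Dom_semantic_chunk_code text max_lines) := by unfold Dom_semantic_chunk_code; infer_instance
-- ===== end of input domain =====

-- B replaces A's index-stride slicing by a single incremental buffered pass over the split lines
-- (same chunks, same cost; objective: alternative decomposition).


-- ===== PORT A =====
def semantic_chunk_code (text : String) (max_lines : Int) : List String :=
  let lines := (PySem.Str.split? text "\n").getD []
  (PySem.List.pyRange 0 (lines.length : Int) max_lines).foldl
    (fun chunks i =>
      let chunk := PySem.Str.join "\n" (PySem.List.slice lines (some i) (some (i + max_lines)))
      if PySem.Str.strip chunk ≠ "" then chunks ++ [chunk] else chunks)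
    []

-- ===== PORT B =====
-- Source B's `_flush`
def pvFlush (chunks : List String) (buf : List String) : List String :=
  let chunk := PySem.Str.join "\n" buf
  if PySem.Str.strip chunk ≠ "" then chunks ++ [chunk] else chunks

def semantic_chunk_code_alt (text : String) (max_lines : Int) : List String :=
  let lines := (PySem.Str.split? text "\n").getD []
  let st := lines.foldl
    (fun (st : List String × List String) line =>
      let buf := st.2 ++ [line]
      if max_lines ≤ (buf.length : Int) then (pvFlush st.1 buf, []) else (st.1, buf))
    ([], [])
  if st.2 ≠ [] then pvFlush st.1 st.2 else st.1

-- ===== PRECONDITION & SPEC =====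
-- Pre_ restricts to the natural domain max_lines ≥ 1: at 0 the Python A raises ValueError
-- (range step 0), and a negative chunk size is outside the task's natural domain (A's empty
-- result there is an artefact of range's empty negative step; B flushes the text as one chunk).
def Pre_semantic_chunk_code (text : String) (max_lines : Int) : Prop := 1 ≤ max_lines
instance (text : String) (max_lines : Int) : Decidable (Pre_semantic_chunk_code text max_lines) := by unfold Pre_semantic_chunk_code; infer_instance
def pvWitness_semantic_chunk_code : String × Int := ("a\nb\nc", 2)

def Spec_semantic_chunk_code (text : String) (max_lines : Int) (out : List String) : Prop := out = semantic_chunk_code_alt text max_lines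
instance (text : String) (max_lines : Int) (out : List String) : Decidable (Spec_semantic_chunk_code text max_lines out) := by unfold Spec_semantic_chunk_code; infer_instance

-- ===== CLAIM (what is proved, stated in full; the proofs are below) =====
def Claim_equal_semantic_chunk_code : Prop := ∀ (text : String) (max_lines : Int), Dom_semantic_chunk_code text max_lines → Pre_semantic_chunk_code text max_lines → Spec_semantic_chunk_code text max_lines (semantic_chunk_code text max_lines)

-- ===== LEMMAS AND PROOFS =====

-- reference decomposition: the split lines grouped into windows of M lines
def pvGroups (M : Nat) : List String → List (List String)
  | [] => []
  | l :: rest => (l :: rest.take (M - 1)) :: pvGroups M (rest.drop (M - 1))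
termination_by ls => ls.length
decreasing_by simp

lemma pvGroups_cons (M : Nat) (hM : 1 ≤ M) (ls : List String) (h : ls ≠ []) :
    pvGroups M ls = ls.take M :: pvGroups M (ls.drop M) := by
  cases ls with
  | nil => exact absurd rfl h
  | cons l rest =>
    cases M with
    | zero => omega
    | succ k =>
      rw [show pvGroups (k + 1) (l :: rest)
            = (l :: rest.take (k + 1 - 1)) :: pvGroups (k + 1) (rest.drop (k + 1 - 1)) from by
          rw [pvGroups.eq_def]]
      simp [List.take_succ_cons, List.drop_succ_cons]

lemma pvGroups_full_cons (M : Nat) (hM : 1 ≤ M) (l rest : List String)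
    (hlen : l.length = M) :
    pvGroups M (l ++ rest) = l :: pvGroups M rest := by
  have hne : l ++ rest ≠ [] := by
    cases l with
    | nil => simp at hlen; omega
    | cons a t => simp
  rw [pvGroups_cons M hM _ hne, ← hlen, List.take_left, List.drop_left]

-- step function of port A's fold, with the source list explicit
def pvStepA (m : Int) (lines : List String) (chunks : List String) (i : Int) : List String :=
  let chunk := PySem.Str.join "\n" (PySem.List.slice lines (some i) (some (i + m)))
  if PySem.Str.strip chunk ≠ "" then chunks ++ [chunk] else chunks

-- range(0, b, m) for 0 < m, 0 < b: head 0, tail = the range for b - m shifted by m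
lemma pvRange_chunk_cons (m b : Int) (hm : 0 < m) (hb : 0 < b) :
    PySem.List.pyRange 0 b m = 0 :: (PySem.List.pyRange 0 (b - m) m).map (· + m) := by
  rw [PySem.List.pyRange_of_pos _ _ hm, PySem.List.pyRange_of_pos _ _ hm]
  have hq : (0:Int) ≤ (b - 1) / m := Int.ediv_nonneg (by omega) (by omega)
  have hcount : (if (0:Int) < b then ((b - 0 + m - 1) / m).toNat else 0)
      = ((b - 1) / m).toNat + 1 := by
    rw [if_pos hb]
    have : b - 0 + m - 1 = (b - 1) + 1 * m := by ring
    rw [this, Int.add_mul_ediv_right _ _ (by omega : m ≠ 0)]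
    omega
  have hcount2 : (if (0:Int) < b - m then ((b - m - 0 + m - 1) / m).toNat else 0)
      = ((b - 1) / m).toNat := by
    by_cases h : (0:Int) < b - m
    · rw [if_pos h]
      congr 2
      ring_nf
    · rw [if_neg h]
      have : (b - 1) / m = 0 := Int.ediv_eq_zero_of_lt (by omega) (by omega)
      omega
  rw [hcount, hcount2, List.range_succ_eq_map, List.map_cons, List.map_map, List.map_map]
  congr 1
  · simp
  · apply List.map_congr_left
    intro k _
    simp [Nat.succ_eq_add_one]
    ring

-- shifting the slice window by m = dropping the first M lines
lemma pvStepA_shift (m : Int) (hm : 0 < m) (lines : List String) (i : Int) (hi : 0 ≤ i)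
    (chunks : List String) :
    pvStepA m lines chunks (i + m) = pvStepA m (lines.drop m.toNat) chunks i := by
  have hs : PySem.List.slice lines (some (i + m)) (some (i + m + m))
      = PySem.List.slice (lines.drop m.toNat) (some i) (some (i + m)) := by
    rw [PySem.List.slice_toNat _ (by omega) (by omega),
        PySem.List.slice_toNat _ hi (by omega), List.drop_drop]
    congr 1
    · omega
    · congr 1
      omega
  unfold pvStepA
  rw [hs]

-- A's fold over range(0, len(lines), m) = a flush-fold over the M-line groups
lemma pvALoop (m : Int) (hm : 1 ≤ m) :
    ∀ (N : Nat) (lines : List String), lines.length ≤ N → ∀ (acc : List String),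
      (PySem.List.pyRange 0 (lines.length : Int) m).foldl (pvStepA m lines) acc
        = (pvGroups m.toNat lines).foldl pvFlush acc := by
  intro N
  induction N with
  | zero =>
    intro lines hlen acc
    cases lines with
    | nil =>
      rw [PySem.List.pyRange_of_pos _ _ (by omega : (0:Int) < m)]
      simp [pvGroups]
    | cons l rest => simp at hlen
  | succ n ih =>
    intro lines hlen acc
    cases hls : lines with
    | nil =>
      rw [PySem.List.pyRange_of_pos _ _ (by omega : (0:Int) < m)]
      simp [pvGroups]
    | cons l rest =>
      rw [← hls]
      have hne : lines ≠ [] := by simp [hls]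
      have hb : (0:Int) < (lines.length : Int) := by
        simp [hls]
      rw [pvRange_chunk_cons m _ (by omega) hb]
      rw [List.foldl_cons, List.foldl_map]
      have hstep0 : pvStepA m lines acc 0 = pvFlush acc (lines.take m.toNat) := by
        unfold pvStepA pvFlush
        rw [PySem.List.slice_zero_start]
        simp only [zero_add]
        rw [PySem.List.slice_to _ (by omega : (0:Int) ≤ m)]
      have hcong : (PySem.List.pyRange 0 ((lines.length : Int) - m) m).foldl
            (fun x y => pvStepA m lines x (y + m)) (pvStepA m lines acc 0)
          = (PySem.List.pyRange 0 ((lines.length : Int) - m) m).foldl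
            (pvStepA m (lines.drop m.toNat)) (pvStepA m lines acc 0) := by
        apply PySem.List.foldl_congr_mem
        intro a x hx
        have h0x : 0 ≤ x := by
          rcases (PySem.List.mem_pyRange_iff_of_pos (by omega : 0 < m) x).mp hx with ⟨h, _⟩
          exact h
        exact pvStepA_shift m (by omega) lines x h0x a
      have hrange : PySem.List.pyRange 0 ((lines.length : Int) - m) m
          = PySem.List.pyRange 0 ((lines.drop m.toNat).length : Int) m := by
        by_cases h : (0:Int) < (lines.length : Int) - m
        · exact congrArg (fun b => PySem.List.pyRange 0 b m)
            (by rw [List.length_drop]; omega)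
        · have hnil : lines.drop m.toNat = [] := List.drop_eq_nil_of_le (by omega)
          rw [hnil,
              PySem.List.pyRange_of_pos _ _ (by omega : (0:Int) < m),
              PySem.List.pyRange_of_pos _ _ (by omega : (0:Int) < m),
              if_neg h]
          norm_num
      have hdroplen : (lines.drop m.toNat).length ≤ n := by
        simp [hls] at hlen ⊢
        omega
      rw [hcong, hrange, ih (lines.drop m.toNat) hdroplen, hstep0]
      rw [pvGroups_cons m.toNat (by omega) lines hne, List.foldl_cons]

-- B's buffered pass from any in-progress state = a flush-fold over the groups of buf ++ lines
lemma pvBLoop (m : Int) (hm : 1 ≤ m) :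
    ∀ (lines : List String) (chunks buf : List String), buf.length < m.toNat →
      (let st := lines.foldl
          (fun (st : List String × List String) line =>
            let b := st.2 ++ [line]
            if m ≤ (b.length : Int) then (pvFlush st.1 b, []) else (st.1, b))
          (chunks, buf)
        if st.2 ≠ [] then pvFlush st.1 st.2 else st.1)
        = (pvGroups m.toNat (buf ++ lines)).foldl pvFlush chunks := by
  intro lines
  induction lines with
  | nil =>
    intro chunks buf hbuf
    cases hb : buf with
    | nil => simp [pvGroups]
    | cons x t =>
      subst hb
      simp only [List.foldl_nil, List.append_nil]
      rw [if_pos (by simp)]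
      rw [pvGroups_cons m.toNat (by omega) (x :: t) (by simp)]
      have h1 : (x :: t).take m.toNat = x :: t := List.take_of_length_le (by omega)
      have h2 : (x :: t).drop m.toNat = [] := List.drop_eq_nil_of_le (by omega)
      rw [h1, h2]
      simp [pvGroups]
  | cons line rest ih =>
    intro chunks buf hbuf
    simp only [List.foldl_cons]
    have hl : (buf ++ [line]).length = buf.length + 1 := by simp
    by_cases hfull : m ≤ ((buf ++ [line]).length : Int)
    · rw [if_pos hfull]
      have hlen : (buf ++ [line]).length = m.toNat := by omega
      have hres := ih (pvFlush chunks (buf ++ [line])) [] (by simp only [List.length_nil]; omega)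
      simp only [List.nil_append] at hres
      have hgroups : pvGroups m.toNat (buf ++ line :: rest)
          = (buf ++ [line]) :: pvGroups m.toNat rest := by
        rw [show buf ++ line :: rest = (buf ++ [line]) ++ rest by simp]
        exact pvGroups_full_cons _ (by omega) _ _ hlen
      rw [hgroups, List.foldl_cons]
      exact hres
    · rw [if_neg hfull]
      have hlt : (buf ++ [line]).length < m.toNat := by omega
      have hres := ih chunks (buf ++ [line]) hlt
      rw [show (buf ++ [line]) ++ rest = buf ++ line :: rest by simp] at hres
      exact hres

-- ===== VERDICT (by name: the statement is the Claim_ definition above) =====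
theorem semantic_chunk_code_spec : Claim_equal_semantic_chunk_code := by
  intro text m _ hpre
  unfold Spec_semantic_chunk_code semantic_chunk_code semantic_chunk_code_alt
  have hm : 1 ≤ m := hpre
  set lines := (PySem.Str.split? text "\n").getD [] with hlines
  have hA := pvALoop m hm lines.length lines (le_refl _) []
  have hB := pvBLoop m hm lines [] [] (by simp; omega)
  simp only [List.nil_append] at hB
  unfold pvStepA at hA
  simp only at hA hB ⊢
  rw [hA, ← hB]
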